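-- pv_equiv track=rewrite | github.com/Gn0lee/personal_repository | swJungle/Week05/algorithm_study/day4_42840.py | solution
-- ===== SOURCE A (Python) =====
-- def solution(answers):
--     answer = []
--
--     students = [[1, 2, 3, 4, 5],[2, 1, 2, 3, 2, 4, 2, 5],[3, 3, 1, 1, 2, 2, 4, 4, 5, 5]]
--     modular = [5,8,10]
--     scores = [0,0,0]
--
--     for i in range(3):
--         grade = 0
--         for index , x in enumerate(answers):
--             if students[i][index%modular[i]] == x:
--                 grade += 1
--         scores[i] = grade
--
--     max_score = max(scores)
--
--     for i,score in enumerate(scores):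
--         if score == max_score:
--             answer.append(i+1)
--
--
--     return answer
-- ===== SOURCE B (Python) =====
-- def solution(answers):
--     patterns = [[1, 2, 3, 4, 5], [2, 1, 2, 3, 2, 4, 2, 5], [3, 3, 1, 1, 2, 2, 4, 4, 5, 5]]
--     # Histogram of (index mod 40, answer) pairs: 40 = lcm of the pattern periods,
--     # so each student's score is a fixed 40-term lookup sum over the histogram.
--     hist = {}
--     for index, x in enumerate(answers):
--         key = (index % 40, x)
--         hist[key] = hist.get(key, 0) + 1
--     scores = [sum(hist.get((r, pat[r % len(pat)]), 0) for r in range(40)) for pat in patterns]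
--     best = max(scores)
--     return [i + 1 for i, s in enumerate(scores) if s == best]
-- ===== Notes on version B (the rewrite author's own statement) =====
-- stated objective: alternative
-- what changed: Replaces A's three per-student counting scans of answers by a residue histogram: one pass builds a dict keyed by (index mod 40, answer) (40 = lcm of the pattern periods), and each score is then a fixed 40-term lookup sum that never revisits the answers.
import Mathlib
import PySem

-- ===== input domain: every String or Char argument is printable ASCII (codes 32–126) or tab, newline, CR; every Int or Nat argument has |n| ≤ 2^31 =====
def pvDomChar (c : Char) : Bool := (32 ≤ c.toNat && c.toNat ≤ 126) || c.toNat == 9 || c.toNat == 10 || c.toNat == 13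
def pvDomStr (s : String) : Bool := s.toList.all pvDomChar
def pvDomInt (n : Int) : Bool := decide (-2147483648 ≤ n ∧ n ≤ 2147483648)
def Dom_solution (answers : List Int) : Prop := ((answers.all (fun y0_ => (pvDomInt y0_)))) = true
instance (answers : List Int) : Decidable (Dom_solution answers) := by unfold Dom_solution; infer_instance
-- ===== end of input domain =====

-- B replaces A's three per-student counting scans by a residue histogram keyed by (index mod 40, answer); alternative algorithm, same result.


-- ===== PORT A =====
def pvStudents : List (List Int) := [[1, 2, 3, 4, 5], [2, 1, 2, 3, 2, 4, 2, 5], [3, 3, 1, 1, 2, 2, 4, 4, 5, 5]]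
def pvModular : List Int := [5, 8, 10]

-- the inner 'for index, x in enumerate(answers)' loop of A, for student i
def pvGrade (i : Nat) (answers : List Int) : Int :=
  (PySem.List.enumerate answers 0).foldl
    (fun grade p =>
      if PySem.List.pyGetD (pvStudents.getD i []) (PySem.Int.mod p.1 (pvModular.getD i 0)) 0 = p.2
      then grade + 1 else grade) 0

def solution (answers : List Int) : List Int :=
  let scores : List Int := (List.range 3).map (fun i => pvGrade i answers)
  let maxScore : Int := (PySem.List.max? scores (fun y => y)).getD 0
  (PySem.List.enumerate scores 0).foldl
    (fun answer p => if p.2 = maxScore then answer ++ [p.1 + 1] else answer) []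

-- ===== PORT B =====
-- 'for index, x in enumerate(answers): key = (index % 40, x); hist[key] = hist.get(key, 0) + 1'
def pvHist (answers : List Int) : PySem.Dict (Int × Int) Int :=
  (PySem.List.enumerate answers 0).foldl
    (fun h p =>
      h.insert (PySem.Int.mod p.1 40, p.2) (h.getD (PySem.Int.mod p.1 40, p.2) 0 + 1))
    PySem.Dict.empty

-- 'sum(hist.get((r, pat[r % len(pat)]), 0) for r in range(40))'
def pvScore (hist : PySem.Dict (Int × Int) Int) (pat : List Int) : Int :=
  (PySem.List.pyRange 0 40 1).foldl
    (fun s r => s + hist.getD (r, PySem.List.pyGetD pat (PySem.Int.mod r (pat.length : Int)) 0) 0) 0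

def solution_alt (answers : List Int) : List Int :=
  let hist := pvHist answers
  let scores := ([[1, 2, 3, 4, 5], [2, 1, 2, 3, 2, 4, 2, 5], [3, 3, 1, 1, 2, 2, 4, 4, 5, 5]] : List (List Int)).map
    (fun pat => pvScore hist pat)
  let best := (PySem.List.max? scores (fun y => y)).getD 0
  (PySem.List.enumerate scores 0).filterMap (fun p => if p.2 = best then some (p.1 + 1) else none)

-- ===== PRECONDITION & SPEC =====
def Spec_solution (answers : List Int) (out : List Int) : Prop := out = solution_alt answers
instance (answers : List Int) (out : List Int) : Decidable (Spec_solution answers out) := by unfold Spec_solution; infer_instance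

-- ===== CLAIM (what is proved, stated in full; the proofs are below) =====
def Claim_equal_solution : Prop := ∀ (answers : List Int), Dom_solution answers → Spec_solution answers (solution answers)

-- ===== LEMMAS AND PROOFS =====

-- proof-only helpers: the keyed pair list behind pvHist, and the expected value per residue
def pvKeyed (answers : List Int) : List (Int × Int) :=
  (PySem.List.enumerate answers 0).map (fun p => (PySem.Int.mod p.1 40, p.2))

def pvF (pat : List Int) : Int → Int :=
  fun r => PySem.List.pyGetD pat (PySem.Int.mod r (pat.length : Int)) 0

-- A's counting loop is a countP
theorem pvFoldCount (P : Int × Int → Prop) [DecidablePred P] (l : List (Int × Int)) (a : Int) :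
    l.foldl (fun g p => if P p then g + 1 else g) a
      = a + (l.countP (fun p => decide (P p)) : Int) := by
  induction l generalizing a with
  | nil => simp
  | cons p t ih => by_cases h : P p <;> simp [h, ih, List.countP_cons] <;> omega

-- a 0/1 indicator summed over a Nodup list containing q.1 picks the unique matching term
theorem pvSumInd (f : Int → Int) (q : Int × Int) :
    ∀ (R : List Int), R.Nodup → q.1 ∈ R →
      (R.map (fun r => if q = (r, f r) then (1 : Int) else 0)).sum
        = if q.2 = f q.1 then 1 else 0 := by
  intro R
  induction R with
  | nil => intro _ h; simp at h
  | cons r R' ih =>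
      intro hnd hq
      simp only [List.map_cons, List.sum_cons]
      rcases List.mem_cons.mp hq with h1 | h1
      · subst h1
        have hz : (R'.map (fun r => if q = (r, f r) then (1 : Int) else 0)).sum = 0 := by
          apply List.sum_eq_zero
          intro x hx
          rcases List.mem_map.mp hx with ⟨r', hr', hxe⟩
          have hne : q ≠ (r', f r') := by
            intro he
            exact (List.nodup_cons.mp hnd).1 (he ▸ hr')
          simpa [hne] using hxe.symm
        rw [hz]
        by_cases h2 : q.2 = f q.1
        · simp [h2, Prod.ext_iff]
        · simp [h2, Prod.ext_iff]
      · have hne : q ≠ (r, f r) := by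
          intro he
          apply (List.nodup_cons.mp hnd).1
          rw [he] at h1
          simpa using h1
        rw [if_neg hne, ih (List.nodup_cons.mp hnd).2 h1]
        ring

-- summing per-key counts over all residues recovers one countP over the pair list
theorem pvSumCount (f : Int → Int) (R : List Int) (hR : R.Nodup) :
    ∀ (l : List (Int × Int)), (∀ p ∈ l, p.1 ∈ R) →
      (R.map (fun r => (l.count (r, f r) : Int))).sum
        = (l.countP (fun p => decide (p.2 = f p.1)) : Int) := by
  intro l
  induction l with
  | nil => intro _; simp
  | cons p t ih =>
      intro hmem
      have ht := ih (fun q hq => hmem q (List.mem_cons_of_mem _ hq))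
      have hsplit : (R.map (fun r => ((p :: t).count (r, f r) : Int))).sum
          = (R.map (fun r => (t.count (r, f r) : Int))).sum
            + (R.map (fun r => if p = (r, f r) then (1 : Int) else 0)).sum := by
        rw [← List.sum_map_add]
        apply congrArg
        apply List.map_congr_left
        intro r _
        by_cases h : p = (r, f r) <;> simp [List.count_cons, h] <;> omega
      rw [hsplit, ht, pvSumInd f p R hR (hmem p (List.mem_cons_self ..))]
      by_cases h : p.2 = f p.1 <;> simp [List.countP_cons, h] <;> omega

-- composing Python mods: (i % 40) % m = i % m when m divides 40
theorem pvModMod (i m : Int) (hm : 0 < m) (hd : m ∣ 40) :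
    PySem.Int.mod (PySem.Int.mod i 40) m = PySem.Int.mod i m := by
  rw [PySem.Int.mod_eq_emod_of_pos (show (0:Int) < 40 by norm_num),
    PySem.Int.mod_eq_emod_of_pos hm, PySem.Int.mod_eq_emod_of_pos hm,
    Int.emod_emod_of_dvd i hd]

-- B's histogram lookup is a count in the keyed pair list
theorem pvHistGetD (answers : List Int) (k : Int × Int) :
    (pvHist answers).getD k 0 = ((pvKeyed answers).count k : Int) := by
  have hhist : pvHist answers
      = (pvKeyed answers).foldl (fun d x => d.insert x (d.getD x 0 + 1)) PySem.Dict.empty := by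
    unfold pvKeyed
    rw [List.foldl_map]
    rfl
  rw [hhist, PySem.Dict.getD_foldl_insert_add_one, PySem.Dict.getD_empty, zero_add]

-- B's score for one pattern equals A's counting scan over enumerate
theorem pvScoreEq (answers : List Int) (pat : List Int) (hpos : 0 < pat.length)
    (hd : (pat.length : Int) ∣ 40) :
    pvScore (pvHist answers) pat
      = ((PySem.List.enumerate answers 0).countP
          (fun p => decide (PySem.List.pyGetD pat (PySem.Int.mod p.1 (pat.length : Int)) 0 = p.2)) : Int) := by
  unfold pvScore
  rw [PySem.List.foldl_add]
  have hmap : (PySem.List.pyRange 0 40 1).map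
        (fun r => (pvHist answers).getD (r, PySem.List.pyGetD pat (PySem.Int.mod r (pat.length : Int)) 0) 0)
      = (PySem.List.pyRange 0 40 1).map
        (fun r => ((pvKeyed answers).count (r, pvF pat r) : Int)) := by
    apply List.map_congr_left
    intro r _
    exact pvHistGetD answers (r, pvF pat r)
  rw [hmap]
  have hmemK : ∀ p ∈ pvKeyed answers, p.1 ∈ PySem.List.pyRange 0 40 1 := by
    intro p hp
    rcases List.mem_map.mp hp with ⟨q, _, hqe⟩
    rw [PySem.List.mem_pyRange_one, ← hqe]
    exact ⟨PySem.Int.mod_nonneg q.1 (by norm_num), PySem.Int.mod_lt q.1 (by norm_num)⟩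
  rw [zero_add, pvSumCount (pvF pat) (PySem.List.pyRange 0 40 1)
    (PySem.List.nodup_pyRange_one 0 40) (pvKeyed answers) hmemK]
  unfold pvKeyed
  rw [List.countP_map]
  apply congrArg
  apply List.countP_congr
  intro p _
  simp only [Function.comp_apply, pvF,
    pvModMod p.1 (pat.length : Int) (by exact_mod_cast hpos) hd]
  simp [eq_comm]

-- A's grade loop is the same countP
theorem pvGradeEq (answers : List Int) (i : Nat) :
    pvGrade i answers
      = ((PySem.List.enumerate answers 0).countP
          (fun p => decide (PySem.List.pyGetD (pvStudents.getD i [])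
            (PySem.Int.mod p.1 (pvModular.getD i 0)) 0 = p.2)) : Int) := by
  unfold pvGrade
  rw [pvFoldCount]
  ring

-- final stage: on a 3-element score list, A's append loop = B's filterMap comprehension
theorem pvTail (c1 c2 c3 : Int) (m : Int) :
    (PySem.List.enumerate [c1, c2, c3] 0).foldl
        (fun answer p => if p.2 = m then answer ++ [p.1 + 1] else answer) []
      = (PySem.List.enumerate [c1, c2, c3] 0).filterMap
        (fun p => if p.2 = m then some (p.1 + 1) else none) := by
  simp only [PySem.List.enumerate_cons, PySem.List.enumerate_nil, List.foldl_cons,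
    List.foldl_nil, List.filterMap_cons, List.filterMap_nil]
  split_ifs <;> simp

-- ===== VERDICT (by name: the statement is the Claim_ definition above) =====
theorem solution_spec : Claim_equal_solution := by
  intro answers _
  show solution answers = solution_alt answers
  have hr : (List.range 3).map (fun i => pvGrade i answers)
      = [pvGrade 0 answers, pvGrade 1 answers, pvGrade 2 answers] := by
    simp [List.range_succ]
  have hscores : [pvGrade 0 answers, pvGrade 1 answers, pvGrade 2 answers]
      = ([[1, 2, 3, 4, 5], [2, 1, 2, 3, 2, 4, 2, 5], [3, 3, 1, 1, 2, 2, 4, 4, 5, 5]] : List (List Int)).map (fun pat => pvScore (pvHist answers) pat) := by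
    have h0 := pvScoreEq answers [1, 2, 3, 4, 5] (by decide) (by decide)
    have h1 := pvScoreEq answers [2, 1, 2, 3, 2, 4, 2, 5] (by decide) (by decide)
    have h2 := pvScoreEq answers [3, 3, 1, 1, 2, 2, 4, 4, 5, 5] (by decide) (by decide)
    rw [pvGradeEq answers 0, pvGradeEq answers 1, pvGradeEq answers 2]
    show _ = [pvScore (pvHist answers) [1, 2, 3, 4, 5],
      pvScore (pvHist answers) [2, 1, 2, 3, 2, 4, 2, 5],
      pvScore (pvHist answers) [3, 3, 1, 1, 2, 2, 4, 4, 5, 5]]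
    rw [h0, h1, h2]
    rfl
  unfold solution solution_alt
  show (PySem.List.enumerate ((List.range 3).map (fun i => pvGrade i answers)) 0).foldl
      (fun answer p =>
        if p.2 = (PySem.List.max? ((List.range 3).map (fun i => pvGrade i answers)) (fun y => y)).getD 0
        then answer ++ [p.1 + 1] else answer) []
    = (PySem.List.enumerate (([[1, 2, 3, 4, 5], [2, 1, 2, 3, 2, 4, 2, 5], [3, 3, 1, 1, 2, 2, 4, 4, 5, 5]] : List (List Int)).map (fun pat => pvScore (pvHist answers) pat)) 0).filterMap
      (fun p =>
        if p.2 = (PySem.List.max? (([[1, 2, 3, 4, 5], [2, 1, 2, 3, 2, 4, 2, 5], [3, 3, 1, 1, 2, 2, 4, 4, 5, 5]] : List (List Int)).map (fun pat => pvScore (pvHist answers) pat)) (fun y => y)).getD 0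
        then some (p.1 + 1) else none)
  rw [← hscores, hr]
  exact pvTail _ _ _ _
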